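-- pv_equiv track=rewrite | github.com/mutl3y/prism | src/prism/scanner_readme/render.py | _filter_ordered_sections_by_metadata
-- ===== SOURCE A (Python) =====
-- def _filter_ordered_sections_by_metadata(
--     ordered_sections: list[dict],
--     enabled_sections: set[str],
--     keep_unknown_style_sections: bool,
-- ) -> list[dict]:
--     """Filter sections by unknown/enabled metadata controls."""
--     filtered_sections = ordered_sections
--     if not keep_unknown_style_sections:
--         filtered_sections = [
--             section for section in filtered_sections if section.get("id") != "unknown"
--         ]
--     if enabled_sections:
--         filtered_sections = [
--             section
--             for section in filtered_sections
--             if section.get("id") in enabled_sections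
--         ]
--     return filtered_sections
-- ===== SOURCE B (Python) =====
-- def _filter_ordered_sections_by_metadata(
--     ordered_sections: list[dict],
--     enabled_sections: set[str],
--     keep_unknown_style_sections: bool,
-- ) -> list[dict]:
--     """Memoize the per-id decision: build the set of admissible ids once,
--     then keep exactly the sections whose id is in that set."""
--     allowed_ids = set()
--     for section in ordered_sections:
--         sid = section.get("id")
--         if sid in allowed_ids:
--             continue
--         if (keep_unknown_style_sections or sid != "unknown") and (
--             not enabled_sections or sid in enabled_sections
--         ):
--             allowed_ids.add(sid)
--     return [section for section in ordered_sections if section.get("id") in allowed_ids]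
-- ===== Notes on version B (the rewrite author's own statement) =====
-- stated objective: alternative
-- what changed: Instead of A's two staged filtering passes over the section list, B first builds a hash set of admissible ids (evaluating the metadata controls once per distinct id) and then keeps exactly the sections whose id is in that set.
import Mathlib
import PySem

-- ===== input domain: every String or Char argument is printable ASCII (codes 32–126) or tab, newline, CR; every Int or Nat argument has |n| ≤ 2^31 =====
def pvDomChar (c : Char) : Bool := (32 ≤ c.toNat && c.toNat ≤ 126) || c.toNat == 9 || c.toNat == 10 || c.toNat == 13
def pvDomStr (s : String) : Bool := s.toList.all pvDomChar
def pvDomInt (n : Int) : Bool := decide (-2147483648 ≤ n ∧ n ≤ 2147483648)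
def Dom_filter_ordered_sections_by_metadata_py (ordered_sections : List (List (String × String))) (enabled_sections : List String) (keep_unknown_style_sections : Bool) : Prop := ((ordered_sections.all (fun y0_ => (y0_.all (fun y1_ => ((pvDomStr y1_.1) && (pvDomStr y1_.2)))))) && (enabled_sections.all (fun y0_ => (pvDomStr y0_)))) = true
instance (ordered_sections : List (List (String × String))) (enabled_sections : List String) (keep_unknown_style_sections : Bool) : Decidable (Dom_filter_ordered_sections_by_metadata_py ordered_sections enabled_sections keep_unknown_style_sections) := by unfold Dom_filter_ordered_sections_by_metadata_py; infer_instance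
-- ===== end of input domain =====

-- B builds the set of admissible ids once (one metadata-control evaluation per distinct id) and keeps sections by membership, instead of A's two staged filter passes (objective: alternative); return value only (A may return the input list object itself).


-- ===== PORT A =====
def filter_ordered_sections_by_metadata_py (ordered_sections : List (List (String × String))) (enabled_sections : List String) (keep_unknown_style_sections : Bool) : List (List (String × String)) :=
  -- filtered_sections = ordered_sections
  let filtered1 : List (List (String × String)) :=
    if keep_unknown_style_sections = false then
      -- [section for section in filtered_sections if section.get("id") != "unknown"]
      ordered_sections.filter (fun sec => !((PySem.Dict.mk sec).get? "id" == some "unknown"))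
    else ordered_sections
  let filtered2 : List (List (String × String)) :=
    if !enabled_sections.isEmpty then
      -- [section for section in filtered_sections if section.get("id") in enabled_sections]
      filtered1.filter (fun sec =>
        match (PySem.Dict.mk sec).get? "id" with
        | some v => enabled_sections.contains v
        | none => false)
    else filtered1
  filtered2

-- ===== PORT B =====
-- section.get("id") (None when absent)
def pvGetId (sec : List (String × String)) : Option String := (PySem.Dict.mk sec).get? "id"

-- B's combined admissibility test for one id value
def pvAdmit (enabled_sections : List String) (keep_unknown_style_sections : Bool) (sid : Option String) : Bool :=
  (keep_unknown_style_sections || !(sid == some "unknown"))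
  && (enabled_sections.isEmpty ||
      (match sid with
       | some v => enabled_sections.contains v
       | none => false))

def filter_ordered_sections_by_metadata_py_alt (ordered_sections : List (List (String × String))) (enabled_sections : List String) (keep_unknown_style_sections : Bool) : List (List (String × String)) :=
  let allowed_ids : PySem.Set (Option String) :=
    ordered_sections.foldl (fun acc sec =>
      let sid := pvGetId sec
      if PySem.Set.contains acc sid then acc
      else if pvAdmit enabled_sections keep_unknown_style_sections sid then PySem.Set.add acc sid
      else acc) PySem.Set.empty
  ordered_sections.filter (fun sec => PySem.Set.contains allowed_ids (pvGetId sec))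

-- ===== PRECONDITION & SPEC =====
def Spec_filter_ordered_sections_by_metadata_py (ordered_sections : List (List (String × String))) (enabled_sections : List String) (keep_unknown_style_sections : Bool) (out : List (List (String × String))) : Prop := out = filter_ordered_sections_by_metadata_py_alt ordered_sections enabled_sections keep_unknown_style_sections
instance (ordered_sections : List (List (String × String))) (enabled_sections : List String) (keep_unknown_style_sections : Bool) (out : List (List (String × String))) : Decidable (Spec_filter_ordered_sections_by_metadata_py ordered_sections enabled_sections keep_unknown_style_sections out) := by unfold Spec_filter_ordered_sections_by_metadata_py; infer_instance

-- ===== CLAIM (what is proved, stated in full; the proofs are below) =====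
def Claim_equal_filter_ordered_sections_by_metadata_py : Prop := ∀ (ordered_sections : List (List (String × String))) (enabled_sections : List String) (keep_unknown_style_sections : Bool), Dom_filter_ordered_sections_by_metadata_py ordered_sections enabled_sections keep_unknown_style_sections → Spec_filter_ordered_sections_by_metadata_py ordered_sections enabled_sections keep_unknown_style_sections (filter_ordered_sections_by_metadata_py ordered_sections enabled_sections keep_unknown_style_sections)

-- ===== LEMMAS AND PROOFS =====

theorem set_contains_iff (s : PySem.Set (Option String)) (x : Option String) :
    PySem.Set.contains s x = true ↔ x ∈ s := by
  simp [PySem.Set.contains_eq_listContains]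

-- membership in B's accumulated id set: exactly the initial members plus the admissible ids occurring in the list
theorem mem_allowed_fold (es : List String) (k : Bool) (l : List (List (String × String)))
    (acc : PySem.Set (Option String)) (x : Option String) :
    x ∈ l.foldl (fun acc sec =>
      let sid := pvGetId sec
      if PySem.Set.contains acc sid then acc
      else if pvAdmit es k sid then PySem.Set.add acc sid
      else acc) acc
    ↔ x ∈ acc ∨ (pvAdmit es k x = true ∧ ∃ sec ∈ l, pvGetId sec = x) := by
  induction l generalizing acc with
  | nil => simp
  | cons h t ih =>
    simp only [List.foldl_cons, ih]
    by_cases hc : PySem.Set.contains acc (pvGetId h) = true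
    · have hm : pvGetId h ∈ acc := (set_contains_iff _ _).mp hc
      simp only [hc, if_true]
      constructor
      · rintro (hx | ⟨ha, sec, hs, he⟩)
        · exact Or.inl hx
        · exact Or.inr ⟨ha, sec, List.mem_cons_of_mem _ hs, he⟩
      · rintro (hx | ⟨ha, sec, hs, he⟩)
        · exact Or.inl hx
        · rcases List.mem_cons.mp hs with rfl | hs'
          · exact Or.inl (he ▸ hm)
          · exact Or.inr ⟨ha, sec, hs', he⟩
    · simp only [Bool.not_eq_true] at hc
      simp only [hc, Bool.false_eq_true, if_false]
      by_cases ha : pvAdmit es k (pvGetId h) = true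
      · simp only [ha, if_true, PySem.Set.mem_add]
        constructor
        · rintro ((hx | rfl) | ⟨ha', sec, hs, he⟩)
          · exact Or.inl hx
          · exact Or.inr ⟨ha, h, List.mem_cons_self, rfl⟩
          · exact Or.inr ⟨ha', sec, List.mem_cons_of_mem _ hs, he⟩
        · rintro (hx | ⟨ha', sec, hs, he⟩)
          · exact Or.inl (Or.inl hx)
          · rcases List.mem_cons.mp hs with rfl | hs'
            · exact Or.inl (Or.inr he.symm)
            · exact Or.inr ⟨ha', sec, hs', he⟩
      · simp only [ha, Bool.false_eq_true, if_false]
        constructor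
        · rintro (hx | ⟨ha', sec, hs, he⟩)
          · exact Or.inl hx
          · exact Or.inr ⟨ha', sec, List.mem_cons_of_mem _ hs, he⟩
        · rintro (hx | ⟨ha', sec, hs, he⟩)
          · exact Or.inl hx
          · rcases List.mem_cons.mp hs with rfl | hs'
            · exact absurd (he ▸ ha') ha
            · exact Or.inr ⟨ha', sec, hs', he⟩

-- B is the one-pass filter by the combined predicate
theorem alt_eq_filter (os : List (List (String × String))) (es : List String) (k : Bool) :
    filter_ordered_sections_by_metadata_py_alt os es k
      = os.filter (fun sec => pvAdmit es k (pvGetId sec)) := by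
  unfold filter_ordered_sections_by_metadata_py_alt
  refine List.filter_congr ?_
  intro sec hs
  by_cases ha : pvAdmit es k (pvGetId sec) = true
  · simp only [ha]
    exact (set_contains_iff _ _).mpr ((mem_allowed_fold es k os PySem.Set.empty _).mpr
      (Or.inr ⟨ha, sec, hs, rfl⟩))
  · simp only [Bool.not_eq_true] at ha
    simp only [ha]
    by_contra hc
    simp only [Bool.not_eq_false] at hc
    rcases (mem_allowed_fold es k os PySem.Set.empty _).mp ((set_contains_iff _ _).mp hc) with
      hx | ⟨ha', _, _, _⟩
    · simp [PySem.Set.empty] at hx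
    · simp [ha] at ha'

-- ===== VERDICT (by name: the statement is the Claim_ definition above) =====
theorem filter_ordered_sections_by_metadata_py_spec : Claim_equal_filter_ordered_sections_by_metadata_py := by
  intro os es k _
  unfold Spec_filter_ordered_sections_by_metadata_py
  rw [alt_eq_filter]
  unfold filter_ordered_sections_by_metadata_py
  cases k <;> cases h : es.isEmpty <;>
    simp [h, List.filter_filter, pvAdmit, pvGetId, Bool.and_comm]
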